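-- pv_equiv track=rewrite | github.com/AdamSlack/Advent-Of-Code | 2015/5/main.py | hasPairWithoutOverlap
-- ===== SOURCE A (Python) =====
-- def hasPairWithoutOverlap(stringToCheck):
--   """ ensures a pair appaears twice  with no '(x{x)x}' overlaps """
--   pairs = ['{first}{second}'.format(first=stringToCheck[i], second=stringToCheck[i+1]) for i in range(len(stringToCheck)-1) ]
--
--   numOfPairs = len(pairs)
--   for i in range(numOfPairs):
--     for j in range(i+2, numOfPairs):
--       if(pairs[i] == pairs[j]):
--         return True
--   return False
-- ===== SOURCE B (Python) =====
-- def hasPairWithoutOverlap(stringToCheck):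
--   """ ensures a pair appears twice with no overlap: single pass, dict of first index per pair """
--   first = {}
--   for j in range(len(stringToCheck) - 1):
--     pair = stringToCheck[j] + stringToCheck[j + 1]
--     if pair in first:
--       if j - first[pair] >= 2:
--         return True
--     else:
--       first[pair] = j
--   return False
-- ===== Notes on version B (the rewrite author's own statement) =====
-- stated objective: faster
-- what changed: Replaced the quadratic all-pairs comparison of adjacent-character pairs with a single pass that records each pair's first index in a dict and reports success when the same pair reappears at distance >= 2.
import Mathlib
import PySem

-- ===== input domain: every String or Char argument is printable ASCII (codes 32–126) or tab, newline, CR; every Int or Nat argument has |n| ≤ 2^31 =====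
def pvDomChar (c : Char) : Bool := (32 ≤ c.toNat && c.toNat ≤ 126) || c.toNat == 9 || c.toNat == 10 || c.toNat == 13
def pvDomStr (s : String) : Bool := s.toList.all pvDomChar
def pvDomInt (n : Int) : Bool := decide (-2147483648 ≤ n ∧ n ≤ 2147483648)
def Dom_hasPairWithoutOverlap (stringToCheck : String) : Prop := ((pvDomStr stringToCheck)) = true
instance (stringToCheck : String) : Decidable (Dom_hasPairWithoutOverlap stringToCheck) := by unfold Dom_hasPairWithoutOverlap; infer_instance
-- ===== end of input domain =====

-- B replaces A's quadratic all-pairs scan with one linear pass keeping each pair's first index in a dict (timed asymptotically faster).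

-- ===== PORT A =====
-- indices i and i+1 are always in range of the list (i < len-1), so getD is exact for Python's s[i]
def pvLoopJ (pairs : List String) (n i j : Nat) : Bool :=
  if _h : j < n then
    if pairs.getD i "" = pairs.getD j "" then true
    else pvLoopJ pairs n i (j + 1)
  else false
termination_by n - j

def pvLoopI (pairs : List String) (n i : Nat) : Bool :=
  if _h : i < n then
    if pvLoopJ pairs n i (i + 2) then true else pvLoopI pairs n (i + 1)
  else false
termination_by n - i

def hasPairWithoutOverlap (stringToCheck : String) : Bool :=
  let cs := stringToCheck.toList
  let pairs := (List.range (cs.length - 1)).map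
      (fun i => String.mk [cs.getD i ' ', cs.getD (i + 1) ' '])
  pvLoopI pairs pairs.length 0

-- ===== PORT B =====
-- single pass: dict maps each two-char pair to the index of its first occurrence
def pvLoopB (cs : List Char) (n : Nat) (d : PySem.Dict String Nat) (j : Nat) : Bool :=
  if _h : j < n then
    let p := String.mk [cs.getD j ' ', cs.getD (j + 1) ' ']
    match d.get? p with
    | some k => if 2 ≤ j - k then true else pvLoopB cs n d (j + 1)
    | none => pvLoopB cs n (d.insert p j) (j + 1)
  else false
termination_by n - j

def hasPairWithoutOverlap_alt (stringToCheck : String) : Bool :=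
  let cs := stringToCheck.toList
  pvLoopB cs (cs.length - 1) PySem.Dict.empty 0

-- ===== PRECONDITION & SPEC =====
def Spec_hasPairWithoutOverlap (stringToCheck : String) (out : Bool) : Prop := out = hasPairWithoutOverlap_alt stringToCheck
instance (stringToCheck : String) (out : Bool) : Decidable (Spec_hasPairWithoutOverlap stringToCheck out) := by unfold Spec_hasPairWithoutOverlap; infer_instance

-- ===== CLAIM (what is proved, stated in full; the proofs are below) =====
def Claim_equal_hasPairWithoutOverlap : Prop := ∀ (stringToCheck : String), Dom_hasPairWithoutOverlap stringToCheck → Spec_hasPairWithoutOverlap stringToCheck (hasPairWithoutOverlap stringToCheck)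

-- ===== LEMMAS AND PROOFS =====

-- the pair starting at index i
def pvPairAt (cs : List Char) (i : Nat) : String := String.mk [cs.getD i ' ', cs.getD (i + 1) ' ']

lemma pvPairs_getD (cs : List Char) (j : Nat) (hj : j < cs.length - 1) :
    ((List.range (cs.length - 1)).map
      (fun i => String.mk [cs.getD i ' ', cs.getD (i + 1) ' '])).getD j "" = pvPairAt cs j := by
  simp [List.getD_eq_getElem?_getD, hj, pvPairAt]

-- A-side characterisation
lemma pvLoopJ_iff (pairs : List String) (n i : Nat) :
    ∀ f j, n - j = f →
      (pvLoopJ pairs n i j = true ↔ ∃ j', j ≤ j' ∧ j' < n ∧ pairs.getD i "" = pairs.getD j' "") := by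
  intro f
  induction f with
  | zero =>
    intro j hf
    rw [pvLoopJ]
    constructor
    · intro h; split at h; · omega
      · simp_all
    · rintro ⟨j', h1, h2, _⟩; omega
  | succ f ih =>
    intro j hf
    have hj : j < n := by omega
    rw [pvLoopJ]
    simp only [hj, dif_pos]
    by_cases he : pairs.getD i "" = pairs.getD j ""
    · rw [if_pos he]
      exact iff_of_true rfl ⟨j, le_refl _, hj, he⟩
    · rw [if_neg he, ih (j + 1) (by omega)]
      constructor
      · rintro ⟨j', h1, h2, h3⟩; exact ⟨j', by omega, h2, h3⟩
      · rintro ⟨j', h1, h2, h3⟩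
        refine ⟨j', ?_, h2, h3⟩
        rcases Nat.eq_or_lt_of_le h1 with h | h
        · exact absurd (h ▸ h3) he
        · omega

lemma pvLoopI_iff (pairs : List String) (n : Nat) :
    ∀ f i, n - i = f →
      (pvLoopI pairs n i = true ↔
        ∃ i' j', i ≤ i' ∧ j' < n ∧ i' + 2 ≤ j' ∧ pairs.getD i' "" = pairs.getD j' "") := by
  intro f
  induction f with
  | zero =>
    intro i hf
    rw [pvLoopI]
    constructor
    · intro h; split at h; · omega
      · simp_all
    · rintro ⟨i', j', h1, h2, h3, _⟩; omega
  | succ f ih =>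
    intro i hf
    have hi : i < n := by omega
    rw [pvLoopI]
    simp only [hi, dif_pos]
    by_cases hj : pvLoopJ pairs n i (i + 2) = true
    · rw [if_pos hj]
      obtain ⟨j', h1, h2, h3⟩ := (pvLoopJ_iff pairs n i (n - (i + 2)) (i + 2) rfl).mp hj
      exact iff_of_true rfl ⟨i, j', le_refl _, h2, h1, h3⟩
    · rw [if_neg hj, ih (i + 1) (by omega)]
      constructor
      · rintro ⟨i', j', h1, h2, h3, h4⟩; exact ⟨i', j', by omega, h2, h3, h4⟩
      · rintro ⟨i', j', h1, h2, h3, h4⟩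
        rcases Nat.eq_or_lt_of_le h1 with h | h
        · exfalso
          exact hj ((pvLoopJ_iff pairs n i (n - (i + 2)) (i + 2) rfl).mpr
            ⟨j', by omega, h2, by rw [h]; exact h4⟩)
        · exact ⟨i', j', by omega, h2, h3, h4⟩

-- dict invariant: d holds exactly the first occurrence index of every pair seen before j
def pvInv (cs : List Char) (d : PySem.Dict String Nat) (j : Nat) : Prop :=
  ∀ p k, d.get? p = some k ↔ (k < j ∧ pvPairAt cs k = p ∧ ∀ m < k, pvPairAt cs m ≠ p)

-- B-side characterisation under the invariant
lemma pvLoopB_iff (cs : List Char) (n : Nat) :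
    ∀ f j d, n - j = f → pvInv cs d j →
      (pvLoopB cs n d j = true ↔
        ∃ i' j', j ≤ j' ∧ j' < n ∧ i' + 2 ≤ j' ∧ pvPairAt cs i' = pvPairAt cs j') := by
  intro f
  induction f with
  | zero =>
    intro j d hf _
    rw [pvLoopB]
    constructor
    · intro h; split at h; · omega
      · simp_all
    · rintro ⟨i', j', h1, h2, _, _⟩; omega
  | succ f ih =>
    intro j d hf hinv
    have hj : j < n := by omega
    rw [pvLoopB]
    simp only [hj, dif_pos]
    cases hg : d.get? (String.mk [cs.getD j ' ', cs.getD (j + 1) ' ']) with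
    | some k =>
      obtain ⟨hk1, hk2, hk3⟩ := (hinv _ _).mp hg
      show (if 2 ≤ j - k then true else pvLoopB cs n d (j + 1)) = true ↔
        ∃ i' j', j ≤ j' ∧ j' < n ∧ i' + 2 ≤ j' ∧ pvPairAt cs i' = pvPairAt cs j'
      by_cases hgap : 2 ≤ j - k
      · rw [if_pos hgap]
        exact iff_of_true rfl ⟨k, j, le_refl _, hj, by omega, hk2⟩
      · rw [if_neg hgap]
        have hinv' : pvInv cs d (j + 1) := by
          intro p m
          rw [hinv p m]
          constructor
          · rintro ⟨h1, h2, h3⟩; exact ⟨by omega, h2, h3⟩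
          · rintro ⟨h1, h2, h3⟩
            refine ⟨?_, h2, h3⟩
            rcases Nat.lt_or_ge m j with h | h
            · exact h
            · exfalso
              have hmj : m = j := by omega
              subst hmj
              exact h3 k hk1 (hk2.trans h2)
        rw [ih (j + 1) d (by omega) hinv']
        constructor
        · rintro ⟨i', j', h1, h2, h3, h4⟩; exact ⟨i', j', by omega, h2, h3, h4⟩
        · rintro ⟨i', j', h1, h2, h3, h4⟩
          rcases Nat.eq_or_lt_of_le h1 with h | h
          · -- a hit at j' = j contradicts the small gap: the first occurrence k is ≤ i'
            exfalso
            have hi'j : pvPairAt cs i' = pvPairAt cs j := by rw [h]; exact h4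
            have hki : k ≤ i' := by
              by_contra hc
              exact hk3 i' (by omega) hi'j
            omega
          · exact ⟨i', j', by omega, h2, h3, h4⟩
    | none =>
      show pvLoopB cs n (d.insert (String.mk [cs.getD j ' ', cs.getD (j + 1) ' ']) j) (j + 1) = true ↔
        ∃ i' j', j ≤ j' ∧ j' < n ∧ i' + 2 ≤ j' ∧ pvPairAt cs i' = pvPairAt cs j'
      have hg' : d.get? (pvPairAt cs j) = none := hg
      have hnone : ∀ m < j, pvPairAt cs m ≠ pvPairAt cs j := by
        intro m hm he
        have hex : ∃ m, pvPairAt cs m = pvPairAt cs j ∧ m < j := ⟨m, he, hm⟩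
        have hfind := Nat.find_spec hex
        have hmem := (hinv (pvPairAt cs j) (Nat.find hex)).mpr
          ⟨hfind.2, hfind.1, fun m' hm' hc =>
            Nat.find_min hex hm' ⟨hc, by have := hfind.2; omega⟩⟩
        rw [hg'] at hmem
        simp at hmem
      have hinv' : pvInv cs (d.insert (pvPairAt cs j) j) (j + 1) := by
        intro p m
        rw [PySem.Dict.get?_insert]
        by_cases hpe : p = pvPairAt cs j
        · rw [if_pos hpe]
          constructor
          · intro he
            have hmj : m = j := by injection he with h; omega
            subst hmj
            exact ⟨by omega, hpe.symm, fun m' hm' hc => hnone m' hm' (hpe ▸ hc)⟩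
          · rintro ⟨h1, h2, h3⟩
            rcases Nat.lt_or_ge m j with h | h
            · exact absurd (hpe ▸ h2 : pvPairAt cs m = pvPairAt cs j) (hnone m h)
            · exact congrArg some (by omega)
        · rw [if_neg hpe, hinv p m]
          constructor
          · rintro ⟨h1, h2, h3⟩; exact ⟨by omega, h2, h3⟩
          · rintro ⟨h1, h2, h3⟩
            refine ⟨?_, h2, h3⟩
            rcases Nat.lt_or_ge m j with h | h
            · exact h
            · exact absurd (by omega : m = j) (fun hmj => hpe (hmj ▸ h2).symm)
      rw [show (String.mk [cs.getD j ' ', cs.getD (j + 1) ' ']) = pvPairAt cs j from rfl,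
        ih (j + 1) _ (by omega) hinv']
      constructor
      · rintro ⟨i', j', h1, h2, h3, h4⟩; exact ⟨i', j', by omega, h2, h3, h4⟩
      · rintro ⟨i', j', h1, h2, h3, h4⟩
        rcases Nat.eq_or_lt_of_le h1 with h | h
        · exact absurd (h ▸ h4) (hnone i' (by omega))
        · exact ⟨i', j', by omega, h2, h3, h4⟩

-- the two loops agree on any character list
lemma pvMain_aux (cs : List Char) :
    (let pairs := (List.range (cs.length - 1)).map
        (fun i => String.mk [cs.getD i ' ', cs.getD (i + 1) ' ']);
      pvLoopI pairs pairs.length 0) = pvLoopB cs (cs.length - 1) PySem.Dict.empty 0 := by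
  set n := cs.length - 1 with hn
  set pairs := (List.range n).map (fun i => String.mk [cs.getD i ' ', cs.getD (i + 1) ' ']) with hpairs
  have hlen : pairs.length = n := by simp [hpairs]
  have hinv0 : pvInv cs PySem.Dict.empty 0 := by
    intro p k
    simp [PySem.Dict.get?_empty]
  have hA := pvLoopI_iff pairs pairs.length (pairs.length - 0) 0 rfl
  have hB := pvLoopB_iff cs n (n - 0) 0 PySem.Dict.empty rfl hinv0
  rw [hlen] at hA
  show pvLoopI pairs pairs.length 0 = pvLoopB cs n PySem.Dict.empty 0
  rw [hlen, Bool.eq_iff_iff, hA, hB]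
  constructor
  · rintro ⟨i', j', _, h2, h3, h4⟩
    refine ⟨i', j', Nat.zero_le _, h2, h3, ?_⟩
    rwa [pvPairs_getD cs i' (by omega), pvPairs_getD cs j' (by omega)] at h4
  · rintro ⟨i', j', _, h2, h3, h4⟩
    refine ⟨i', j', Nat.zero_le _, h2, h3, ?_⟩
    rwa [pvPairs_getD cs i' (by omega), pvPairs_getD cs j' (by omega)]

-- ===== VERDICT (by name: the statement is the Claim_ definition above) =====
theorem hasPairWithoutOverlap_spec : Claim_equal_hasPairWithoutOverlap := by
  intro s _
  exact pvMain_aux s.toList
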